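-- pv_equiv track=rewrite | github.com/opencuria/OpenCuria | backend/apps/runners/migrations/0005_fix_agent_command_template_defaults.py | _renderable_args
-- ===== SOURCE A (Python) =====
-- HARDCODED_CHAT_ID = "0af7372f-cb60-4e27-ae07-52937443aeb3"
--
-- def _renderable_args(args):
--     if not isinstance(args, list):
--         return args
--
--     rendered = list(args)
--     for index, arg in enumerate(rendered):
--         if arg == HARDCODED_CHAT_ID:
--             rendered[index] = "{chat_id}"
--             continue
--         if arg == "--model" and index + 1 < len(rendered):
--             model_value = rendered[index + 1]
--             if isinstance(model_value, str) and model_value != "{model}":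
--                 rendered[index + 1] = "{model}"
--     return rendered
-- ===== SOURCE B (Python) =====
-- HARDCODED_CHAT_ID = "0af7372f-cb60-4e27-ae07-52937443aeb3"
--
-- def _renderable_args(args):
--     if not isinstance(args, list):
--         return args
--     out = []
--     i = 0
--     n = len(args)
--     while i < n:
--         a = args[i]
--         if a == "--model" and i + 1 < n:
--             nxt = args[i + 1]
--             out.append(a)
--             out.append("{model}" if isinstance(nxt, str) else nxt)
--             i += 2
--         elif a == HARDCODED_CHAT_ID:
--             out.append("{chat_id}")
--             i += 1
--         else:
--             out.append(a)
--             i += 1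
--     return out
-- ===== Notes on version B (the rewrite author's own statement) =====
-- stated objective: simpler
-- what changed: Instead of copying the list and mutating it in place via an enumerate loop that writes ahead and re-reads the mutated slot, B makes one forward pass that consumes '--model' together with its following argument as a unit and appends to a fresh output list, never re-examining a consumed value.
import Mathlib
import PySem

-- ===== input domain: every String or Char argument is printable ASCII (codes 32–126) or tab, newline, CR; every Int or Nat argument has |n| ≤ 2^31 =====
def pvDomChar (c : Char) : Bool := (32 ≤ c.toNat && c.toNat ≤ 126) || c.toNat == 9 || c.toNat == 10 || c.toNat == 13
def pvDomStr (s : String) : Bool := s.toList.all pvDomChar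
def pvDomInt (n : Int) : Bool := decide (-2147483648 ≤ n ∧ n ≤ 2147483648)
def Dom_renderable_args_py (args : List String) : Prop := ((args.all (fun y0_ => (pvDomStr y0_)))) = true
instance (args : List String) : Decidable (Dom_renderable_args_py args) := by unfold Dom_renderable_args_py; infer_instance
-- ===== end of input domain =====

-- B rebuilds the output in one pair-consuming pass instead of A's mutate-in-place scan (objective: simpler; same O(n) cost).

def pvHC : String := "0af7372f-cb60-4e27-ae07-52937443aeb3"

-- ===== PORT A =====
-- A's for-loop over `enumerate(rendered)` with in-place assignment, as index recursion
-- over the (length-preserving) mutated list.  `isinstance(model_value, str)` is always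
-- true on a List String, so that test is omitted as trivially true.
def pvALoop (rendered : List String) (index : Nat) : List String :=
  if index < rendered.length then
    let arg := rendered.getD index ""
    if arg = pvHC then
      pvALoop (rendered.set index "{chat_id}") (index + 1)
    else if arg = "--model" ∧ index + 1 < rendered.length then
      let model_value := rendered.getD (index + 1) ""
      if model_value ≠ "{model}" then
        pvALoop (rendered.set (index + 1) "{model}") (index + 1)
      else
        pvALoop rendered (index + 1)
    else
      pvALoop rendered (index + 1)
  else rendered
termination_by rendered.length - index
decreasing_by all_goals first | (simp [List.length_set]; omega) | omega

-- `isinstance(args, list)` is always true on a List String; `list(args)` copies values unchanged.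
def renderable_args_py (args : List String) : List String := pvALoop args 0

-- ===== PORT B =====
-- B's while-loop over the input that consumes "--model" together with its following
-- argument as a unit and appends to a fresh output list, as structural recursion on the
-- remaining suffix.  `isinstance(nxt, str)` is always true on a List String.
def pvBGo : List String → List String
  | [] => []
  | [a] => if a = pvHC then ["{chat_id}"] else [a]
  | a :: nxt :: rest =>
    if a = "--model" then a :: "{model}" :: pvBGo rest
    else if a = pvHC then "{chat_id}" :: pvBGo (nxt :: rest)
    else a :: pvBGo (nxt :: rest)

def renderable_args_py_alt (args : List String) : List String := pvBGo args

-- ===== PRECONDITION & SPEC =====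
def Spec_renderable_args_py (args : List String) (out : List String) : Prop := out = renderable_args_py_alt args
instance (args : List String) (out : List String) : Decidable (Spec_renderable_args_py args out) := by unfold Spec_renderable_args_py; infer_instance

-- ===== CLAIM (what is proved, stated in full; the proofs are below) =====
def Claim_equal_renderable_args_py : Prop := ∀ (args : List String), Dom_renderable_args_py args → Spec_renderable_args_py args (renderable_args_py args)

-- ===== LEMMAS AND PROOFS =====

theorem pvBGo_cons_ne {a : String} (t : List String) (h1 : a ≠ "--model") (h2 : a ≠ pvHC) :
    pvBGo (a :: t) = a :: pvBGo t := by
  cases t <;> simp [pvBGo, h1, h2]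

theorem pvBGo_cons_hc (t : List String) : pvBGo (pvHC :: t) = "{chat_id}" :: pvBGo t := by
  have h1 : pvHC ≠ "--model" := by decide
  cases t <;> simp [pvBGo, h1]

theorem pvALoop_eq : ∀ (n : Nat) (cur pre : List String), cur.length = n →
    pvALoop (pre ++ cur) pre.length = pre ++ pvBGo cur := by
  intro n
  induction n using Nat.strong_induction_on with
  | _ n ih =>
    intro cur pre hlen
    match cur with
    | [] => rw [pvALoop]; simp [pvBGo]
    | a :: t =>
      rw [pvALoop]
      have hidx : pre.length < (pre ++ a :: t).length := by simp
      have harg : (pre ++ a :: t).getD pre.length "" = a := by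
        rw [List.getD_append_right _ _ _ _ (le_refl _)]; simp [List.getD]
      simp only [hidx, if_true, harg]
      by_cases hhc : a = pvHC
      · subst hhc
        have hset : (pre ++ pvHC :: t).set pre.length "{chat_id}" =
            (pre ++ ["{chat_id}"]) ++ t := by
          rw [List.set_append_right _ _ (le_refl _)]; simp
        rw [if_pos rfl, hset]
        have : pre.length + 1 = (pre ++ ["{chat_id}"]).length := by simp
        rw [this, ih t.length (by simp at hlen; omega) t _ rfl, pvBGo_cons_hc]
        simp
      · rw [if_neg hhc]
        by_cases hm : a = "--model"
        · subst hm
          match t with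
          | [] =>
            have : ¬ ("--model" = "--model" ∧ pre.length + 1 < (pre ++ ["--model"]).length) := by
              simp
            rw [if_neg this]
            have h2 : pre.length + 1 = (pre ++ ["--model"]).length := by simp
            rw [show pre ++ ["--model"] = (pre ++ ["--model"]) ++ ([] : List String) by simp,
                h2, ih 0 (by simp at hlen; omega) [] _ rfl]
            simp [pvBGo, pvHC]
          | mv :: t' =>
            have hc : ("--model" = "--model" ∧ pre.length + 1 < (pre ++ "--model" :: mv :: t').length) := by
              refine ⟨rfl, ?_⟩
              simp only [List.length_append, List.length_cons]; omega
            rw [if_pos hc]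
            have hmv : (pre ++ "--model" :: mv :: t').getD (pre.length + 1) "" = mv := by
              rw [show pre ++ "--model" :: mv :: t' = (pre ++ ["--model"]) ++ mv :: t' by simp,
                  show pre.length + 1 = (pre ++ ["--model"]).length by simp,
                  List.getD_append_right _ _ _ _ (le_refl _)]
              simp [List.getD]
            rw [hmv]
            have hstep : ∀ t'' : List String, t''.length + 1 < n →
                pvALoop ((pre ++ ["--model"]) ++ "{model}" :: t'') (pre.length + 1) =
                  pre ++ "--model" :: "{model}" :: pvBGo t'' := by
              intro t'' hlt
              rw [show pre.length + 1 = (pre ++ ["--model"]).length by simp,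
                  ih (t''.length + 1) (by omega) ("{model}" :: t'') _ rfl,
                  pvBGo_cons_ne _ (by decide) (by decide)]
              simp
            by_cases hmvm : mv = "{model}"
            · rw [if_neg (by simp [hmvm])]
              subst hmvm
              have := hstep t' (by simp at hlen; omega)
              simpa using this
            · rw [if_pos hmvm]
              have hset2 : (pre ++ "--model" :: mv :: t').set (pre.length + 1) "{model}" =
                  (pre ++ ["--model"]) ++ "{model}" :: t' := by
                rw [show pre ++ "--model" :: mv :: t' = (pre ++ ["--model"]) ++ mv :: t' by simp,
                    List.set_append_right _ _ (by simp)]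
                simp
              rw [hset2, hstep t' (by simp at hlen; omega)]
              simp [pvBGo]
        · have hcnd : ¬ (a = "--model" ∧ pre.length + 1 < (pre ++ a :: t).length) := by
            intro h; exact hm h.1
          rw [if_neg hcnd]
          rw [show pre ++ a :: t = (pre ++ [a]) ++ t by simp,
              show pre.length + 1 = (pre ++ [a]).length by simp,
              ih t.length (by simp at hlen; omega) t _ rfl,
              pvBGo_cons_ne _ hm hhc]
          simp

-- ===== VERDICT (by name: the statement is the Claim_ definition above) =====
theorem renderable_args_py_spec : Claim_equal_renderable_args_py := by
  intro args _
  unfold Spec_renderable_args_py renderable_args_py renderable_args_py_alt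
  have := pvALoop_eq args.length args [] rfl
  simpa using this
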